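-- pv_equiv track=rewrite | github.com/JFSauer/PFC-tuning-types | supporting_functions/Muysers_et_al_helper_functions.py | separate_in_dual_conditional
-- ===== SOURCE A (Python) =====
-- def separate_in_dual_conditional(indices,indices2,not_in):
--     ''' Separate 2 periods of spike-like (point) data.
--     '''
--
--     not_in_range=[]
--     for n in range(len(not_in[0::2])):
--         not_in_range.extend(range(not_in[0::2][n],not_in[1::2][n],1))
--     not_in_range=set(not_in_range)
--
--     ind=[]
--     ind2=[]
--     for n in range(len(indices)):
--         if indices[n] in not_in_range:
--             ind.append(indices[n])
--             ind2.append(indices2[n])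
--
--     return ind,ind2
-- ===== SOURCE B (Python) =====
-- def separate_in_dual_conditional(indices, indices2, not_in):
--     ''' Separate 2 periods of spike-like (point) data.
--     '''
--     intervals = list(zip(not_in[0::2], not_in[1::2]))
--     ind = []
--     ind2 = []
--     for n in range(len(indices)):
--         x = indices[n]
--         if any(s <= x < e for s, e in intervals):
--             ind.append(x)
--             ind2.append(indices2[n])
--     return ind, ind2
-- ===== Notes on version B (the rewrite author's own statement) =====
-- stated objective: faster
-- what changed: B keeps the (start,end) interval pairs and tests each index with any(s <= x < e) instead of expanding every range into a materialised membership set, so the cost no longer depends on the widths of the intervals.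
import Mathlib
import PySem

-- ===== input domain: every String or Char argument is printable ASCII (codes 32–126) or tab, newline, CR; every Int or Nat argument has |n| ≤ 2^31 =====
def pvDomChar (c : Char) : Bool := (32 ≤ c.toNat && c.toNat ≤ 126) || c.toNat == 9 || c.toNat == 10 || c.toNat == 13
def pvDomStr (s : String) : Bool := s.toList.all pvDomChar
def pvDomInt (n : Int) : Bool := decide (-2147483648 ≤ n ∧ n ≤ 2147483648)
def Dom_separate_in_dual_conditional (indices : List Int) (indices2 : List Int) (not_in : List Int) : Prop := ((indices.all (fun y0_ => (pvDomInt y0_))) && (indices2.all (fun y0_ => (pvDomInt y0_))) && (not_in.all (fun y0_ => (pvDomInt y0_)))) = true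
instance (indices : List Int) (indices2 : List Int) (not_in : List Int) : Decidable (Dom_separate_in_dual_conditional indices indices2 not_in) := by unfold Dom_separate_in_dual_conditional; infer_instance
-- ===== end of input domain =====

-- B keeps the (start, end) interval pairs and tests each index against them directly,
-- instead of materialising every integer of every range into a set (simpler, and faster
-- when the ranges are wide).

-- ===== PORT A =====
-- not_in_range = set(union of range(not_in[0::2][n], not_in[1::2][n])); then keep positions whose value is in the set.
def separate_in_dual_conditional (indices : List Int) (indices2 : List Int) (not_in : List Int) : List Int × List Int :=
  let evens : List Int := (PySem.List.slice? not_in (some 0) none 2).getD []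
  let odds : List Int := (PySem.List.slice? not_in (some 1) none 2).getD []
  let not_in_list : List Int :=
    (PySem.List.pyRange 0 (evens.length : Int) 1).foldl
      (fun acc n => acc ++ PySem.List.pyRange (PySem.List.pyGetD evens n 0) (PySem.List.pyGetD odds n 0) 1) []
  let not_in_range : PySem.Set Int := PySem.Set.ofList not_in_list
  (PySem.List.pyRange 0 (indices.length : Int) 1).foldl
    (fun p n =>
      if PySem.Set.contains not_in_range (PySem.List.pyGetD indices n 0) then
        (p.1 ++ [PySem.List.pyGetD indices n 0], p.2 ++ [PySem.List.pyGetD indices2 n 0])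
      else p) ([], [])

-- ===== PORT B =====
-- intervals = zip(not_in[0::2], not_in[1::2]); keep positions whose value lies in some half-open interval.
def separate_in_dual_conditional_alt (indices : List Int) (indices2 : List Int) (not_in : List Int) : List Int × List Int :=
  let intervals : List (Int × Int) :=
    (((PySem.List.slice? not_in (some 0) none 2).getD []).zip ((PySem.List.slice? not_in (some 1) none 2).getD []))
  (PySem.List.pyRange 0 (indices.length : Int) 1).foldl
    (fun p n =>
      let x := PySem.List.pyGetD indices n 0
      if intervals.any (fun se => decide (se.1 ≤ x) && decide (x < se.2)) then
        (p.1 ++ [x], p.2 ++ [PySem.List.pyGetD indices2 n 0])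
      else p) ([], [])

-- ===== PRECONDITION & SPEC =====
-- membership of x in the union of the half-open pairs of not_in (a closed-form input condition)
def pvInPairs (not_in : List Int) (x : Int) : Bool :=
  (List.range (not_in.length / 2)).any
    (fun i => decide (not_in.getD (2 * i) 0 ≤ x) && decide (x < not_in.getD (2 * i + 1) 0))
-- Pre_ excludes exactly the inputs on which the Python A raises IndexError: an odd-length
-- not_in (its start slice outgrows its end slice), and a kept position past the end of indices2.
def Pre_separate_in_dual_conditional (indices : List Int) (indices2 : List Int) (not_in : List Int) : Prop :=
  not_in.length % 2 = 0 ∧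
  ∀ n ∈ List.range indices.length, indices2.length ≤ n → pvInPairs not_in (indices.getD n 0) = false
instance (indices : List Int) (indices2 : List Int) (not_in : List Int) : Decidable (Pre_separate_in_dual_conditional indices indices2 not_in) := by unfold Pre_separate_in_dual_conditional; infer_instance
def pvWitness_separate_in_dual_conditional : List Int × List Int × List Int := ([0, 5], [10, 20], [0, 2])

def Spec_separate_in_dual_conditional (indices : List Int) (indices2 : List Int) (not_in : List Int) (out : List Int × List Int) : Prop := out = separate_in_dual_conditional_alt indices indices2 not_in
instance (indices : List Int) (indices2 : List Int) (not_in : List Int) (out : List Int × List Int) : Decidable (Spec_separate_in_dual_conditional indices indices2 not_in out) := by unfold Spec_separate_in_dual_conditional; infer_instance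

-- ===== CLAIM (what is proved, stated in full; the proofs are below) =====
def Claim_equal_separate_in_dual_conditional : Prop := ∀ (indices : List Int) (indices2 : List Int) (not_in : List Int), Dom_separate_in_dual_conditional indices indices2 not_in → Pre_separate_in_dual_conditional indices indices2 not_in → Spec_separate_in_dual_conditional indices indices2 not_in (separate_in_dual_conditional indices indices2 not_in)

-- ===== LEMMAS AND PROOFS =====

-- a filterMap over range whose function always hits has full length
theorem pv_filterMap_len {α : Type} (f : Nat → Option α) (c : Nat)
    (h : ∀ k < c, (f k).isSome) : (List.filterMap f (List.range c)).length = c := by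
  induction c with
  | zero => simp
  | succ m ih =>
    rw [List.range_succ, List.filterMap_append, List.length_append,
        ih (fun k hk => h k (by omega))]
    have hm := h m (by omega)
    cases hfm : f m with
    | none => rw [hfm] at hm; simp at hm
    | some a => simp [hfm]

-- the two step-2 slices of an even-length list have equal length
theorem pv_slice2_len (xs : List Int) (h : xs.length % 2 = 0) :
    ((PySem.List.slice? xs (some 0) none 2).getD []).length
      = ((PySem.List.slice? xs (some 1) none 2).getD []).length := by
  obtain ⟨m, hm⟩ : ∃ m, xs.length = 2 * m := ⟨xs.length / 2, by omega⟩
  simp only [PySem.List.slice?, PySem.List.sliceIndices]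
  norm_num
  rcases Nat.eq_zero_or_pos m with h0 | hpos
  · simp [hm, h0]
  · rw [show (min 1 (xs.length : Int)) = 1 by omega,
        if_pos (show 0 < xs.length by omega), if_pos (show 1 < xs.length by omega),
        show (((xs.length : Int) + 2 - 1) / 2).toNat = m by omega,
        show (((xs.length : Int) - 1 + 2 - 1) / 2).toNat = m by omega]
    rw [pv_filterMap_len _ m (by
          intro k hk
          have hlt : (2 * (k : Int)).toNat < xs.length := by omega
          simp [hlt]),
        pv_filterMap_len _ m (by
          intro k hk
          have hlt : (1 + 2 * (k : Int)).toNat < xs.length := by omega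
          simp [hlt])]

-- the expanded union-of-ranges list, as a flatMap over positions
theorem pv_expand_flatMap (evens odds : List Int) :
    (PySem.List.pyRange 0 (evens.length : Int) 1).foldl
      (fun acc n => acc ++ PySem.List.pyRange (PySem.List.pyGetD evens n 0) (PySem.List.pyGetD odds n 0) 1) []
    = (List.range evens.length).flatMap
        (fun n => PySem.List.pyRange (evens.getD n 0) (odds.getD n 0) 1) := by
  rw [PySem.List.pyRange_zero_nat, List.foldl_map]
  simp only [PySem.List.pyGetD_natCast]
  rw [PySem.List.foldl_append_eq_flatMap
        (fun n => PySem.List.pyRange (evens.getD n 0) (odds.getD n 0) 1)]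
  simp

-- membership in the expanded set equals the interval test over the zipped pairs
theorem pv_cond_eq (evens odds : List Int) (hlen : evens.length = odds.length) (x : Int) :
    PySem.Set.contains
      (PySem.Set.ofList
        ((PySem.List.pyRange 0 (evens.length : Int) 1).foldl
          (fun acc n => acc ++ PySem.List.pyRange (PySem.List.pyGetD evens n 0) (PySem.List.pyGetD odds n 0) 1) []))
      x
    = (evens.zip odds).any (fun se => decide (se.1 ≤ x) && decide (x < se.2)) := by
  rw [pv_expand_flatMap, Bool.eq_iff_iff, PySem.Set.contains_iff, PySem.Set.mem_ofList,
      List.mem_flatMap, List.any_eq_true]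
  constructor
  · rintro ⟨n, hn, hx⟩
    rw [List.mem_range] at hn
    rw [PySem.List.mem_pyRange_one] at hx
    refine ⟨(evens[n], odds[n]'(hlen ▸ hn)), ?_, ?_⟩
    · rw [List.mem_iff_getElem]
      exact ⟨n, by rw [List.length_zip]; omega, by rw [List.getElem_zip]⟩
    · simp only [List.getD_eq_getElem _ _ hn, List.getD_eq_getElem _ _ (hlen ▸ hn)] at hx
      simp [hx.1, hx.2]
  · rintro ⟨se, hse, hx⟩
    rw [List.mem_iff_getElem] at hse
    obtain ⟨n, hn, hget⟩ := hse
    rw [List.length_zip] at hn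
    refine ⟨n, List.mem_range.mpr (by omega), ?_⟩
    rw [PySem.List.mem_pyRange_one]
    rw [List.getElem_zip] at hget
    simp only [Bool.and_eq_true, decide_eq_true_eq] at hx
    constructor
    · calc evens.getD n 0 = evens[n]'(by omega) := List.getD_eq_getElem _ _ (by omega)
        _ = se.1 := by rw [← hget]
        _ ≤ x := hx.1
    · calc x < se.2 := hx.2
        _ = odds[n]'(by omega) := by rw [← hget]
        _ = odds.getD n 0 := (List.getD_eq_getElem _ _ (by omega)).symm

-- ===== VERDICT (by name: the statement is the Claim_ definition above) =====
theorem separate_in_dual_conditional_spec : Claim_equal_separate_in_dual_conditional := by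
  intro indices indices2 not_in _ hpre
  unfold Spec_separate_in_dual_conditional
  simp only [separate_in_dual_conditional, separate_in_dual_conditional_alt]
  have hlen := pv_slice2_len not_in hpre.1
  congr 1
  funext p n
  rw [pv_cond_eq _ _ hlen]
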